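-- pv_equiv track=rewrite | github.com/MrBrantCode/unitest_baseline | mut_generate/mist_train_taco/taco_8684/solution.py | calculate_test_case_result
-- ===== SOURCE A (Python) =====
-- def calculate_test_case_result(N, M):
--     # Helper function to calculate the sum of squares of digits
--     def go(x):
--         s = str(x)
--         res = 0
--         for i in s:
--             res += int(i) * int(i)
--         return res
--
--     # Precompute the up array
--     up = [[0 for _ in range(1000)] for _ in range(30)]
--
--     for i in range(1000):
--         up[0][i] = go(i)
--
--     for i in range(1, 30):
--         for j in range(1000):
--             up[i][j] = up[i-1][up[i-1][j]]
--
--     # Calculate the result for the given test case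
--     n = go(N)
--     M -= 1
--     for i in range(30):
--         if (M & (1 << i)):
--             n = up[i][n]
--
--     return n
-- ===== SOURCE B (Python) =====
-- def _digit_sq_sum(x):
--     r = 0
--     while x > 0:
--         x, d = divmod(x, 10)
--         r += d * d
--     return r
--
-- def _trajectory(x):
--     path = [x]
--     for _ in range(999):
--         x = _digit_sq_sum(x)
--         path.append(x)
--     return path
--
-- def _cycle_lookup(path, steps):
--     v = path[-1]
--     i = path.index(v)              # start of the cycle
--     c = path.index(v, i + 1) - i   # period
--     return path[i + (steps - i) % c]
--
-- def calculate_test_case_result(N, M):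
--     steps = M - 1
--     path = _trajectory(_digit_sq_sum(N))
--     if 0 <= steps < len(path):
--         return path[steps]
--     return _cycle_lookup(path, steps)
-- ===== Notes on version B (the rewrite author's own statement) =====
-- stated objective: faster
-- what changed: Replaces A's per-call 30x1000 string-based binary-lifting table (30000 digit-square evaluations plus bit-indexed jumps) by one arithmetic 1000-step trajectory of the digit-square map with cycle detection, indexing step M-1 via first-occurrence + period modular arithmetic.
-- intended difference: For M<=0 or M>2^30 whose 30-bit-truncated step count (M-1) mod 2^30 falls inside the orbit's pre-cycle tail, A's binary-lifting table silently applies only (M-1) mod 2^30 steps and returns a pre-cycle iterate, while B returns the cycle value at the true step index M-1; B's value is the intended iterate (at the witness (5, 2^30+1), the true 2^30-fold iterate of 25 is 16, A returns 25). — e.g. on calculate_test_case_result(5, 1073741825): A returns 25, B returns 16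
import Mathlib
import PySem

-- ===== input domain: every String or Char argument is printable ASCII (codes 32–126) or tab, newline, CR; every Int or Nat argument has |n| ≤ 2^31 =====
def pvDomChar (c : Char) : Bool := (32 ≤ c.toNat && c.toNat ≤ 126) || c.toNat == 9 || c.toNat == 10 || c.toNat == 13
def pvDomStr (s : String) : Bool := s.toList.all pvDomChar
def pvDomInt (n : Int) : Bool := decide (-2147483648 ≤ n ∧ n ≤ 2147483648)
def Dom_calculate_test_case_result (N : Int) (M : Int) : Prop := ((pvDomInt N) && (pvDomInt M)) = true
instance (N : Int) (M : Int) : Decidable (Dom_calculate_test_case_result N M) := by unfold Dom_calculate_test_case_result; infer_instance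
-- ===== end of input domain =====

set_option maxRecDepth 20000
set_option maxHeartbeats 1000000


-- B replaces A's per-call 30×1000 string-based binary-lifting table by one arithmetic
-- 1000-step trajectory of the digit-square map with cycle detection (objective: faster);
-- where A's table silently truncates the step count M-1 to 30 bits, B indexes the true
-- step count (stated as the intended difference D_ below).

-- ===== PORT A =====
-- A's helper `go`: sum of int(ch)*int(ch) over the characters of str(x).
-- int(ch) raises ValueError on the '-' of a negative x; Pre_ excludes N < 0, so the
-- `.getD 0` totalisation below is never taken on admitted inputs.
def pvGoA (x : Int) : Int :=
  (PySem.Int.toChars x).foldl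
    (fun res c => res + ((PySem.Int.ofChars? [c]).getD 0) * ((PySem.Int.ofChars? [c]).getD 0)) 0

-- up[0][i] = go(i) for i in range(1000)
def pvRow0 : List Int := (PySem.List.pyRange 0 1000 1).map (fun i => pvGoA i)

-- up[i][j] = up[i-1][up[i-1][j]] for j in range(1000)
def pvNextRow (prev : List Int) : List Int :=
  (PySem.List.pyRange 0 1000 1).map
    (fun j => PySem.List.pyGetD prev (PySem.List.pyGetD prev j 0) 0)

-- the filled table `up` (rows 1..29 each built from row i-1)
def pvUp : List (List Int) :=
  (PySem.List.pyRange 1 30 1).foldl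
    (fun up i => up ++ [pvNextRow (PySem.List.pyGetD up (i - 1) [])]) [pvRow0]

-- n = go(N); M -= 1; for i in range(30): if M & (1 << i): n = up[i][n]
def calculate_test_case_result (N : Int) (M : Int) : Int :=
  (PySem.List.pyRange 0 30 1).foldl
    (fun n i =>
      if PySem.Int.band (M - 1) ((1 : Int) <<< i.toNat) ≠ 0 then
        PySem.List.pyGetD (PySem.List.pyGetD pvUp i []) n 0
      else n) (pvGoA N)

-- ===== PORT B =====
-- B's helper `_digit_sq_sum`: the while-loop as structural recursion on a fuel that
-- bounds the number of iterations (each iteration divides x by 10, so x.toNat + 1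
-- steps always suffice; exact for every admitted input)
def pvFAux : Nat → Int → Int → Int
  | 0, _, r => r
  | fuel + 1, x, r =>
    if 0 < x then
      pvFAux fuel (PySem.Int.floordiv x 10) (r + PySem.Int.mod x 10 * PySem.Int.mod x 10)
    else r

def pvF (x : Int) : Int := pvFAux (x.toNat + 1) x 0

-- B's helper `_trajectory`: the for-loop as a fold carrying (path, x)
def pvTrajectory (x : Int) : List Int :=
  ((PySem.List.pyRange 0 999 1).foldl
    (fun (st : List Int × Int) _ => (st.1 ++ [pvF st.2], pvF st.2)) ([x], x)).1

-- B's helper `_cycle_lookup`.  path.index(v): v = path[-1] is always a member, so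
-- `.getD 0` is never taken on admitted inputs; path.index(v, i+1) is ported by hand as
-- search-in-drop + offset, exact whenever v occurs at an index ≥ i+1 (it does: v is a
-- cycle value).
def pvCycleLookup (path : List Int) (steps : Int) : Int :=
  let v := PySem.List.pyGetD path (-1) 0
  let i := (PySem.List.index? path v).getD 0
  let c := ((PySem.List.index? (path.drop (i + 1)) v).getD 0 + (i + 1)) - i
  PySem.List.pyGetD path ((i : Int) + PySem.Int.mod (steps - (i : Int)) (c : Int)) 0

def calculate_test_case_result_alt (N : Int) (M : Int) : Int :=
  let steps := M - 1
  let path := pvTrajectory (pvF N)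
  if 0 ≤ steps ∧ steps < (path.length : Int) then PySem.List.pyGetD path steps 0
  else pvCycleLookup path steps

-- ===== PRECONDITION & SPEC =====
-- A raises ValueError on N < 0 (int('-') on the sign character of str(N)); Pre_ admits
-- exactly the inputs on which A returns.
def Pre_calculate_test_case_result (N : Int) (M : Int) : Prop := 0 ≤ N
instance (N : Int) (M : Int) : Decidable (Pre_calculate_test_case_result N M) := by
  unfold Pre_calculate_test_case_result; infer_instance
def pvWitness_calculate_test_case_result : Int × Int := (5, 3)

-- an independent (structural, proof-friendly) digit-square-sum on Nat, used only to
-- state the change region D_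
def pvFNCaux : Nat → Nat → Nat
  | 0, _ => 0
  | f + 1, m => if m = 0 then 0 else (m % 10) ^ 2 + pvFNCaux f (m / 10)
def pvFNC (m : Nat) : Nat := pvFNCaux m m

-- For M ≤ 0 or M > 2^30 whose 30-bit-truncated step count (M-1) mod 2^30 falls inside
-- the orbit's pre-cycle tail (no cycle value of the digit-square map is reached within
-- that many steps), A's binary-lifting table silently applies only (M-1) mod 2^30 steps
-- and returns a pre-cycle iterate, while B returns the cycle value at the true step
-- index M-1; B's value is the intended iterate.
def D_calculate_test_case_result (N : Int) (M : Int) : Prop :=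
  (M < 1 ∨ (1073741825 : Int) ≤ M) ∧
  pvFNC^[min ((M - 1) % 1073741824).toNat 999] (pvFNC N.toNat) ∉
    [0, 1, 4, 16, 37, 58, 89, 145, 42, 20]
instance (N : Int) (M : Int) : Decidable (D_calculate_test_case_result N M) := by
  unfold D_calculate_test_case_result; infer_instance

def Spec_calculate_test_case_result (N : Int) (M : Int) (out : Int) : Prop :=
  ¬ D_calculate_test_case_result N M → out = calculate_test_case_result_alt N M
instance (N : Int) (M : Int) (out : Int) : Decidable (Spec_calculate_test_case_result N M out) := by
  unfold Spec_calculate_test_case_result; infer_instance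

def pvDiffWitness_calculate_test_case_result : Int × Int := (5, 1073741825)
def pvDiffWitnessOut_calculate_test_case_result : Int × Int := (25, 16)

-- ===== CLAIM (what is proved, stated in full; the proofs are below) =====
def Claim_unchanged_calculate_test_case_result : Prop :=
  ∀ (N : Int) (M : Int), Dom_calculate_test_case_result N M →
    Pre_calculate_test_case_result N M →
    Spec_calculate_test_case_result N M (calculate_test_case_result N M)

def Claim_changed_calculate_test_case_result : Prop :=
  Dom_calculate_test_case_result (pvDiffWitness_calculate_test_case_result.1) (pvDiffWitness_calculate_test_case_result.2) ∧
  Pre_calculate_test_case_result (pvDiffWitness_calculate_test_case_result.1) (pvDiffWitness_calculate_test_case_result.2) ∧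
  D_calculate_test_case_result (pvDiffWitness_calculate_test_case_result.1) (pvDiffWitness_calculate_test_case_result.2) ∧
  calculate_test_case_result (pvDiffWitness_calculate_test_case_result.1) (pvDiffWitness_calculate_test_case_result.2) = pvDiffWitnessOut_calculate_test_case_result.1 ∧
  calculate_test_case_result_alt (pvDiffWitness_calculate_test_case_result.1) (pvDiffWitness_calculate_test_case_result.2) = pvDiffWitnessOut_calculate_test_case_result.2 ∧
  pvDiffWitnessOut_calculate_test_case_result.1 ≠ pvDiffWitnessOut_calculate_test_case_result.2

def Claim_exact_calculate_test_case_result : Prop :=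
  ∀ (N : Int) (M : Int), Dom_calculate_test_case_result N M →
    Pre_calculate_test_case_result N M →
    D_calculate_test_case_result N M →
    calculate_test_case_result N M ≠ calculate_test_case_result_alt N M

-- ===== LEMMAS AND PROOFS =====

-- the mathematical digit-square-sum map: both ports compute its iterates
def pvFN (m : Nat) : Nat := ((Nat.digits 10 m).map (fun d => d * d)).sum

-- the mathematical content of table row e: the 2^e-fold iterate on [0, 1000)
def pvModelRow (e : Nat) : List Int :=
  (PySem.List.pyRange 0 1000 1).map (fun j => ((pvFN^[2 ^ e] j.toNat : Nat) : Int))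

theorem pvFN_step (m : Nat) (hm : 0 < m) : pvFN m = (m % 10) * (m % 10) + pvFN (m / 10) := by
  unfold pvFN
  rw [Nat.digits_def' (by norm_num) hm]
  simp

theorem pvFNCaux_eq (m : Nat) : ∀ fuel, m ≤ fuel → pvFNCaux fuel m = pvFN m := by
  induction m using Nat.strong_induction_on with
  | _ m ih =>
    intro fuel hf
    by_cases hm : m = 0
    · subst hm
      cases fuel <;> simp [pvFNCaux, pvFN]
    · obtain ⟨f, rfl⟩ : ∃ f, fuel = f + 1 := ⟨fuel - 1, by omega⟩
      rw [pvFNCaux, if_neg hm, ih (m / 10) (by omega) f (by omega),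
        pvFN_step m (by omega)]
      ring

theorem pvFNC_eq (m : Nat) : pvFNC m = pvFN m := pvFNCaux_eq m m le_rfl

theorem pvFAux_eq (m : Nat) : ∀ fuel r, m < fuel → pvFAux fuel (m : Int) r = r + (pvFN m : Int) := by
  induction m using Nat.strong_induction_on with
  | _ m ih =>
    intro fuel r hf
    obtain ⟨f, rfl⟩ : ∃ f, fuel = f + 1 := ⟨fuel - 1, by omega⟩
    rw [pvFAux]
    by_cases h : 0 < (m : Int)
    · have hm : 0 < m := by exact_mod_cast h
      have hfd : PySem.Int.floordiv (m : Int) 10 = ((m / 10 : Nat) : Int) := by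
        exact_mod_cast PySem.Int.floordiv_natCast m 10
      have hmd : PySem.Int.mod (m : Int) 10 = ((m % 10 : Nat) : Int) := by
        exact_mod_cast PySem.Int.mod_natCast m 10
      rw [if_pos h, hfd, hmd]
      rw [ih (m / 10) (by omega) f _ (by omega)]
      rw [pvFN_step m hm]; push_cast; ring
    · have hm : m = 0 := by omega
      rw [if_neg h]; subst hm; simp [pvFN]

theorem pvF_eq (m : Nat) : pvF (m : Int) = (pvFN m : Int) := by
  rw [pvF, pvFAux_eq m _ 0 (by simp)]
  simp

theorem pvFN_le (m e : Nat) (h : m < 10 ^ e) : pvFN m ≤ 81 * e := by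
  have hlen : (Nat.digits 10 m).length ≤ e := (Nat.digits_length_le_iff (by norm_num) m).mpr h
  have h2 : pvFN m ≤ ((Nat.digits 10 m).map (fun d => d * d)).length • 81 := by
    apply List.sum_le_card_nsmul
    intro x hx
    simp only [List.mem_map] at hx
    obtain ⟨d, hd, rfl⟩ := hx
    have := Nat.digits_lt_base (by norm_num) hd
    nlinarith
  simp only [List.length_map, smul_eq_mul] at h2
  calc pvFN m ≤ (Nat.digits 10 m).length * 81 := h2
    _ ≤ e * 81 := Nat.mul_le_mul_right _ hlen
    _ = 81 * e := by ring

theorem pvFN_le_243 (m : Nat) (h : m ≤ 999) : pvFN m ≤ 243 := by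
  have := pvFN_le m 3 (by omega)
  omega

theorem pv_iter_le_999 (n : Nat) (hn : n ≤ 999) (t : Nat) : pvFN^[t] n ≤ 999 := by
  induction t with
  | zero => simpa
  | succ t iht =>
    rw [Function.iterate_succ_apply']
    have := pvFN_le_243 _ iht
    omega

theorem pv_shift_eq (t : Nat) : (1 : Int) <<< t = ((2 ^ t : Nat) : Int) := by
  have h : (1 : Int) <<< t = Int.ofNat (1 <<< t) := rfl
  rw [h, Nat.shiftLeft_eq, one_mul]
  rfl

theorem pv_periodic_shift (n0 p q : Nat) (hpq : p ≤ q) (h : pvFN^[p] n0 = pvFN^[q] n0) :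
    ∀ t, p ≤ t → pvFN^[t] n0 = pvFN^[t + (q - p)] n0 := by
  intro t htp
  obtain ⟨s, rfl⟩ := Nat.exists_eq_add_of_le htp
  have e1 : p + s = s + p := by omega
  have e2 : s + p + (q - p) = s + q := by omega
  rw [e1, e2, Function.iterate_add_apply, Function.iterate_add_apply, h]

theorem pv_mod_period (n0 i c : Nat) (hc : 0 < c) (h : pvFN^[i] n0 = pvFN^[i + c] n0) :
    ∀ t, i ≤ t → pvFN^[t] n0 = pvFN^[i + (t - i) % c] n0 := by
  intro t
  induction t using Nat.strong_induction_on with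
  | _ t iht =>
    intro hit
    by_cases hlt : t - i < c
    · rw [Nat.mod_eq_of_lt hlt]; congr 1; omega
    · have hi' : i ≤ t - c := by omega
      have hstep : pvFN^[t - c] n0 = pvFN^[t] n0 := by
        have hs := pv_periodic_shift n0 i (i + c) (by omega) h (t - c) hi'
        rw [hs]; congr 1; omega
      rw [← hstep, iht (t - c) (by omega) hi']
      congr 2
      rw [Nat.mod_eq_sub_mod (by omega : c ≤ t - i)]
      congr 1; omega

theorem pv_exists_early (n0 : Nat) (hn : n0 ≤ 999) :
    ∃ p, p < 999 ∧ pvFN^[p] n0 = pvFN^[999] n0 := by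
  have hmap : Set.MapsTo (fun t => pvFN^[t + 1] n0) ↑(Finset.range 999) ↑(Finset.range 244) := by
    intro t _
    simp only [Finset.coe_range, Set.mem_Iio]
    rw [Function.iterate_succ_apply']
    have h1 := pv_iter_le_999 n0 hn t
    have h2 := pvFN_le_243 _ h1
    omega
  obtain ⟨a, ha, b, hb, hne, heq⟩ :=
    Finset.exists_ne_map_eq_of_card_lt_of_maps_to (by simp) hmap
  simp only [Finset.mem_range] at ha hb
  rcases Nat.lt_or_ge a b with hab | hab
  · refine ⟨999 - (b - a), by omega, ?_⟩
    have hs := pv_periodic_shift n0 (a + 1) (b + 1) (by omega) heq (999 - (b - a)) (by omega)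
    rw [hs]; congr 1; omega
  · have hba : b < a := by omega
    refine ⟨999 - (a - b), by omega, ?_⟩
    have hs := pv_periodic_shift n0 (b + 1) (a + 1) (by omega) heq.symm (999 - (a - b)) (by omega)
    rw [hs]; congr 1; omega

theorem pv_toDigitsCore_eq (n : Nat) : ∀ (f : Nat) (ds : List Char), 0 < n → n ≤ f →
    Nat.toDigitsCore 10 (f + 1) n ds = ((Nat.digits 10 n).map Nat.digitChar).reverse ++ ds := by
  induction n using Nat.strong_induction_on with
  | _ n ihn =>
    intro f ds h1 h2
    have hstep : Nat.toDigitsCore 10 (f + 1) n ds =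
        if n / 10 = 0 then Nat.digitChar (n % 10) :: ds
        else Nat.toDigitsCore 10 f (n / 10) (Nat.digitChar (n % 10) :: ds) := rfl
    rw [hstep]
    by_cases h : n / 10 = 0
    · rw [if_pos h]
      rw [Nat.digits_def' (by norm_num : (1:Nat) < 10) h1, h]
      simp
    · rw [if_neg h]
      have hdlt : n / 10 < n := Nat.div_lt_self h1 (by norm_num)
      obtain ⟨f', rfl⟩ : ∃ f', f = f' + 1 := ⟨f - 1, by omega⟩
      rw [ihn (n / 10) hdlt f' _ (Nat.pos_of_ne_zero h) (by omega)]
      rw [Nat.digits_def' (by norm_num : (1:Nat) < 10) h1]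
      simp

theorem pv_toChars_nat (m : Nat) :
    PySem.Int.toChars (m : Int) =
      if m = 0 then ['0'] else ((Nat.digits 10 m).map Nat.digitChar).reverse := by
  unfold PySem.Int.toChars
  rw [if_neg (by omega)]
  by_cases h : m = 0
  · subst h; decide
  · rw [if_neg h]
    have ht : ((m : Int)).toNat = m := by omega
    rw [ht]
    show Nat.toDigitsCore 10 (m + 1) m [] = _
    rw [pv_toDigitsCore_eq m m [] (Nat.pos_of_ne_zero h) le_rfl]
    simp

theorem pv_ofChars_digitChar (d : Nat) (h : d < 10) :
    PySem.Int.ofChars? [Nat.digitChar d] = some (d : Int) := by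
  interval_cases d <;> decide

theorem pvGoA_eq (m : Nat) : pvGoA (m : Int) = (pvFN m : Int) := by
  unfold pvGoA
  rw [pv_toChars_nat]
  by_cases h : m = 0
  · subst h; decide
  · rw [if_neg h]
    rw [PySem.List.foldl_add]
    rw [List.map_reverse, List.sum_reverse, List.map_map]
    have hcongr : (Nat.digits 10 m).map
        ((fun c => ((PySem.Int.ofChars? [c]).getD 0) * ((PySem.Int.ofChars? [c]).getD 0)) ∘ Nat.digitChar)
        = (Nat.digits 10 m).map (fun d => ((d * d : Nat) : Int)) := by
      apply List.map_congr_left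
      intro d hd
      have hlt := Nat.digits_lt_base (by norm_num) hd
      simp only [Function.comp_apply, pv_ofChars_digitChar d hlt, Option.getD_some]
      push_cast; ring
    rw [hcongr, zero_add]
    unfold pvFN
    rw [Nat.cast_list_sum, List.map_map]
    rfl

theorem pv_key (P S A q : Nat) (hA : A < P) (hq : q < S) :
    P * S - 1 - (P * q + A) = (P - 1 - A) + P * (S - 1 - q) := by
  have hz : P * (S - 1 - q) = P * S - P - P * q := by
    rw [Nat.mul_sub, Nat.mul_sub, Nat.mul_one]
  have hPS : P * q + P ≤ P * S := by
    have h1 : P * (q + 1) ≤ P * S := Nat.mul_le_mul_left _ (by omega)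
    calc P * q + P = P * (q + 1) := by ring
      _ ≤ P * S := h1
  omega

theorem pv_testBit_compl (r t m : Nat) (hr : r < 2 ^ m) (ht : t < m) :
    (2 ^ m - 1 - r).testBit t = ! r.testBit t := by
  set A := r % 2 ^ (t + 1) with hA
  set q := r / 2 ^ (t + 1) with hq
  have hAlt : A < 2 ^ (t + 1) := Nat.mod_lt _ (Nat.two_pow_pos _)
  have hrep : r = 2 ^ (t + 1) * q + A := (Nat.div_add_mod r (2 ^ (t + 1))).symm
  have hs : 2 ^ m = 2 ^ (t + 1) * 2 ^ (m - t - 1) := by rw [← pow_add]; congr 1; omega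
  have hqs : q < 2 ^ (m - t - 1) := by
    rw [hq, Nat.div_lt_iff_lt_mul (Nat.two_pow_pos _)]
    calc r < 2 ^ m := hr
      _ = 2 ^ (m - t - 1) * 2 ^ (t + 1) := by rw [hs]; ring
  have hB : (2 ^ m - 1 - r) % 2 ^ (t + 1) = 2 ^ (t + 1) - 1 - A := by
    have key : 2 ^ m - 1 - r = (2 ^ (t + 1) - 1 - A) + 2 ^ (t + 1) * (2 ^ (m - t - 1) - 1 - q) := by
      conv_lhs => rw [hs, hrep]
      exact pv_key _ _ _ _ hAlt hqs
    rw [key, Nat.add_mul_mod_self_left, Nat.mod_eq_of_lt (by omega)]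
  have hpow : 2 ^ (t + 1) = 2 ^ t * 2 := pow_succ 2 t
  have e1 : (2 ^ m - 1 - r) / 2 ^ t % 2 = (2 ^ (t + 1) - 1 - A) / 2 ^ t := by
    rw [← Nat.mod_mul_right_div_self, ← hpow, hB]
  have e2 : r / 2 ^ t % 2 = A / 2 ^ t := by
    rw [← Nat.mod_mul_right_div_self, ← hpow]
  rw [Nat.testBit_eq_decide_div_mod_eq, Nat.testBit_eq_decide_div_mod_eq, e1, e2]
  have h2t : 0 < 2 ^ t := Nat.two_pow_pos t
  by_cases hsm : A < 2 ^ t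
  · have d1 : A / 2 ^ t = 0 := Nat.div_eq_of_lt hsm
    have d2 : (2 ^ (t + 1) - 1 - A) / 2 ^ t = 1 := by
      apply Nat.div_eq_of_lt_le <;> omega
    rw [d1, d2]; simp
  · have d1 : A / 2 ^ t = 1 := by
      apply Nat.div_eq_of_lt_le <;> omega
    have d2 : (2 ^ (t + 1) - 1 - A) / 2 ^ t = 0 := Nat.div_eq_of_lt (by omega)
    rw [d1, d2]; simp

theorem pv_band_bit (a : Int) (t : Nat) (ht : t < 30) :
    (PySem.Int.band a ((1 : Int) <<< t) ≠ 0) ↔ ((a % (2 ^ 30 : Int)).toNat).testBit t := by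
  rw [pv_shift_eq]
  have h2t : (0 : Int) ≤ ((2 ^ t : Nat) : Int) := by positivity
  unfold PySem.Int.band
  by_cases ha : 0 ≤ a
  · rw [if_pos ha, if_pos h2t]
    have htn : ((2 ^ t : Nat) : Int).toNat = 2 ^ t := by omega
    rw [htn, Nat.and_two_pow]
    have hk : (a % (2 ^ 30 : Int)).toNat = a.toNat % 2 ^ 30 := by omega
    rw [hk, Nat.testBit_mod_two_pow]
    cases h : a.toNat.testBit t
    · simp
    · simp only [ht, decide_true, Bool.true_and, iff_true, Bool.toNat_true, one_mul]
      have : (0:Nat) < 2 ^ t := Nat.two_pow_pos t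
      omega
  · rw [if_neg ha, if_pos h2t]
    have htn : ((2 ^ t : Nat) : Int).toNat = 2 ^ t := by omega
    rw [htn]
    have hk : (a % (2 ^ 30 : Int)).toNat = 2 ^ 30 - 1 - (-a - 1).toNat % 2 ^ 30 := by omega
    rw [hk, pv_testBit_compl ((-a - 1).toNat % 2 ^ 30) t 30 (Nat.mod_lt _ (by norm_num)) ht]
    rw [Nat.testBit_mod_two_pow]
    rw [Nat.land_comm, Nat.and_two_pow]
    cases h : (-a - 1).toNat.testBit t
    · simp only [ht, decide_true, Bool.true_and, Bool.not_false, iff_true, Bool.toNat_false,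
        zero_mul, Nat.sub_zero]
      have : (0:Nat) < 2 ^ t := Nat.two_pow_pos t
      omega
    · simp only [ht, decide_true, Bool.true_and, Bool.not_true, Bool.toNat_true,
        one_mul, Nat.sub_self]
      simp

theorem pvRow0_eq : pvRow0 = pvModelRow 0 := by
  unfold pvRow0 pvModelRow
  apply List.map_congr_left
  intro j hj
  rw [PySem.List.mem_pyRange_one] at hj
  have hj' : j = ((j.toNat : Nat) : Int) := by omega
  conv_lhs => rw [hj']
  rw [pvGoA_eq]
  norm_num

theorem pvNextRow_eq (e : Nat) : pvNextRow (pvModelRow e) = pvModelRow (e + 1) := by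
  unfold pvNextRow pvModelRow
  apply List.map_congr_left
  intro j hj
  rw [PySem.List.mem_pyRange_one] at hj
  rw [PySem.List.pyGetD_map_pyRange_of_nonneg _ 1000 j 0 hj.1 hj.2]
  have hb : pvFN^[2 ^ e] j.toNat ≤ 999 := pv_iter_le_999 _ (by omega) _
  rw [PySem.List.pyGetD_map_pyRange_of_nonneg _ 1000 _ 0 (by positivity) (by exact_mod_cast by omega)]
  have ht : ((pvFN^[2 ^ e] j.toNat : Nat) : Int).toNat = pvFN^[2 ^ e] j.toNat := by omega
  rw [ht, ← Function.iterate_add_apply]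
  congr 2
  rw [pow_succ]; ring

theorem pvUp_aux (t : Nat) (ht : t ≤ 29) :
    (PySem.List.pyRange 1 (1 + (t : Int)) 1).foldl
      (fun up i => up ++ [pvNextRow (PySem.List.pyGetD up (i - 1) [])]) [pvRow0]
      = (List.range (t + 1)).map pvModelRow := by
  induction t with
  | zero =>
    rw [show (1 + ((0:Nat) : Int)) = 1 by norm_num, PySem.List.pyRange_one_eq_nil le_rfl]
    simp [pvRow0_eq]
  | succ t iht =>
    have hcast : (1 + ((t + 1 : Nat) : Int)) = (1 + (t : Int)) + 1 := by push_cast; ring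
    rw [hcast, PySem.List.pyRange_one_succ_right (by omega), List.foldl_append,
      iht (by omega)]
    simp only [List.foldl_cons, List.foldl_nil]
    have hidx : (1 + (t : Int)) - 1 = ((t : Nat) : Int) := by ring
    rw [hidx, PySem.List.pyGetD_natCast, PySem.List.getD_map_range pvModelRow (t + 1) t [] (by omega),
      pvNextRow_eq]
    conv_rhs => rw [List.range_succ]
    rw [List.map_append]
    rfl

theorem pvUp_eq : pvUp = (List.range 30).map pvModelRow := by
  unfold pvUp
  rw [show (30 : Int) = 1 + ((29 : Nat) : Int) by norm_num]
  exact pvUp_aux 29 le_rfl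

theorem pvA_eq (N M : Int) (hN : 0 ≤ N) (hDom : N ≤ 2147483648) :
    calculate_test_case_result N M =
      ((pvFN^[(((M - 1) % (2 ^ 30 : Int)).toNat)] (pvFN N.toNat) : Nat) : Int) := by
  unfold calculate_test_case_result
  set K := ((M - 1) % (2 ^ 30 : Int)).toNat with hK
  set n0 := pvFN N.toNat with hn0
  have hn0le : n0 ≤ 999 := by
    have h10 : N.toNat < 10 ^ 10 := by omega
    have := pvFN_le N.toNat 10 h10
    omega
  have hgo : pvGoA N = (n0 : Int) := by
    conv_lhs => rw [show N = ((N.toNat : Nat) : Int) by omega]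
    rw [pvGoA_eq]
  have hKlt : K < 2 ^ 30 := by
    have h1 : (M - 1) % (2 ^ 30 : Int) < 2 ^ 30 := Int.emod_lt_of_pos _ (by norm_num)
    omega
  rw [hgo, PySem.List.pyRange_one 0 30, show ((30 : Int) - 0).toNat = 30 by decide,
    List.foldl_map]
  have main : ∀ t, t ≤ 30 →
      (List.range t).foldl
        (fun (n : Int) (k : Nat) =>
          if PySem.Int.band (M - 1) ((1 : Int) <<< ((0 : Int) + (k : Int)).toNat) ≠ 0 then
            PySem.List.pyGetD (PySem.List.pyGetD pvUp ((0 : Int) + (k : Int)) []) n 0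
          else n) ((n0 : Nat) : Int)
        = ((pvFN^[K % 2 ^ t] n0 : Nat) : Int) := by
    intro t
    induction t with
    | zero => intro _; simp [Nat.mod_one]
    | succ t iht =>
      intro ht30
      rw [List.range_succ, List.foldl_append, iht (by omega)]
      simp only [List.foldl_cons, List.foldl_nil]
      have htoNat : ((0 : Int) + (t : Int)).toNat = t := by omega
      rw [htoNat]
      have hbit : (PySem.Int.band (M - 1) ((1 : Int) <<< t) ≠ 0) ↔ K.testBit t := by
        rw [hK]
        exact pv_band_bit (M - 1) t (by omega)
      have hprev : pvFN^[K % 2 ^ t] n0 ≤ 999 := pv_iter_le_999 _ hn0le _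
      have hmp : K % 2 ^ (t + 1) = K % 2 ^ t + 2 ^ t * (K / 2 ^ t % 2) := Nat.mod_pow_succ
      by_cases hb : PySem.Int.band (M - 1) ((1 : Int) <<< t) ≠ 0
      · rw [if_pos hb]
        have hdiv : K / 2 ^ t % 2 = 1 := by
          have htb := hbit.mp hb
          rw [Nat.testBit_eq_decide_div_mod_eq] at htb
          simpa using htb
        rw [hdiv, Nat.mul_one] at hmp
        rw [show ((0 : Int) + (t : Int)) = ((t : Nat) : Int) by ring]
        rw [pvUp_eq,
          PySem.List.pyGetD_natCast (List.map pvModelRow (List.range 30)) t [],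
          PySem.List.getD_map_range pvModelRow 30 t [] (by omega)]
        unfold pvModelRow
        rw [PySem.List.pyGetD_map_pyRange_of_nonneg _ 1000 _ 0 (by positivity)
          (by exact_mod_cast by omega)]
        rw [show ((pvFN^[K % 2 ^ t] n0 : Nat) : Int).toNat = pvFN^[K % 2 ^ t] n0 by omega]
        rw [← Function.iterate_add_apply]
        congr 2
        omega
      · rw [if_neg hb]
        have hdiv : K / 2 ^ t % 2 = 0 := by
          have htb : ¬ K.testBit t = true := fun h => hb (hbit.mpr h)
          rw [Nat.testBit_eq_decide_div_mod_eq] at htb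
          simp only [decide_eq_true_eq] at htb
          omega
        rw [hdiv, Nat.mul_zero] at hmp
        rw [hmp]
        norm_num
  have hfin := main 30 le_rfl
  rw [Nat.mod_eq_of_lt hKlt] at hfin
  exact hfin

-- the trajectory value at step s, as an Int (proof helper for the B side)
def pvTraj (n0 s : Nat) : Int := ((pvFN^[s] n0 : Nat) : Int)

theorem pvTraj_getD (n0 k m : Nat) (hk : k < m) :
    ((List.range m).map (pvTraj n0)).getD k 0 = pvTraj n0 k :=
  PySem.List.getD_map_range (pvTraj n0) m k 0 hk

theorem pvTraj_getElem (n0 k m : Nat) (_hk : k < m) (h : k < ((List.range m).map (pvTraj n0)).length) :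
    ((List.range m).map (pvTraj n0))[k] = pvTraj n0 k := by
  simp

theorem pvTrajectory_eq (n0 : Nat) :
    pvTrajectory ((n0 : Nat) : Int) = (List.range 1000).map (pvTraj n0) := by
  unfold pvTrajectory
  rw [PySem.List.pyRange_one 0 999, show ((999 : Int) - 0).toNat = 999 by decide,
    List.foldl_map]
  have pathlem : ∀ t : Nat,
      (List.range t).foldl
        (fun (st : List Int × Int) (_ : Nat) => (st.1 ++ [pvF st.2], pvF st.2))
        ([((n0 : Nat) : Int)], ((n0 : Nat) : Int))
        = ((List.range (t + 1)).map (pvTraj n0), pvTraj n0 t) := by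
    intro t
    induction t with
    | zero => simp [pvTraj]
    | succ t iht =>
      rw [List.range_succ, List.foldl_append, iht]
      simp only [List.foldl_cons, List.foldl_nil]
      have hstep : pvF (pvTraj n0 t) = pvTraj n0 (t + 1) := by
        unfold pvTraj
        rw [pvF_eq, Function.iterate_succ_apply']
      rw [hstep]
      conv_rhs => rw [List.range_succ]
      rw [List.map_append]
      rfl
  rw [pathlem 999]

-- characterisation of B's cycle lookup: it returns the iterate at index i + ((steps-i) mod c)
-- where i is the first occurrence of the cycle value path[-1] and c the (minimal) period
theorem pvCycleLookup_char (n0 : Nat) (hn0le : n0 ≤ 999) (steps : Int) :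
    ∃ i c r : Nat, 0 < c ∧ i + c ≤ 999 ∧ r < c ∧
      pvFN^[i] n0 = pvFN^[999] n0 ∧
      (∀ t, t < i → pvFN^[t] n0 ≠ pvFN^[999] n0) ∧
      pvFN^[i + c] n0 = pvFN^[i] n0 ∧
      (∀ p, 0 < p → p < c → pvFN^[i + p] n0 ≠ pvFN^[i] n0) ∧
      ((r : Int) = PySem.Int.mod (steps - (i : Int)) ((c : Int))) ∧
      pvCycleLookup ((List.range 1000).map (pvTraj n0)) steps = ((pvFN^[i + r] n0 : Nat) : Int) := by
  unfold pvCycleLookup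
  simp only []
  have hlen : ((List.range 1000).map (pvTraj n0)).length = 1000 := by simp
  have hv : PySem.List.pyGetD ((List.range 1000).map (pvTraj n0)) (-1 : Int) 0
      = pvTraj n0 999 := by
    unfold PySem.List.pyGetD PySem.List.pyGet?
    rw [hlen, show PySem.List.pyIdx? 1000 (-1) = some 999 from by decide,
      show ((some 999).bind fun k => ((List.range 1000).map (pvTraj n0))[k]?) =
        ((List.range 1000).map (pvTraj n0))[999]? from rfl,
      ← List.getD_eq_getElem?_getD, pvTraj_getD n0 999 1000 (by omega)]
  rw [hv]
  obtain ⟨p, hp999, hpeq⟩ := pv_exists_early n0 hn0le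
  have hmem : pvTraj n0 999 ∈ (List.range 1000).map (pvTraj n0) :=
    List.mem_map_of_mem (List.mem_range.mpr (by omega))
  obtain ⟨i, hi⟩ := Option.isSome_iff_exists.mp
    ((PySem.List.index?_isSome_iff _ _).mpr hmem)
  rw [hi]
  simp only [Option.getD_some]
  obtain ⟨hilen, hieq, himin⟩ := PySem.List.getElem_of_index?_eq_some hi
  have hip : i ≤ p := by
    by_contra hgt
    refine himin p (by omega) ?_
    rw [pvTraj_getElem n0 p 1000 (by omega)]
    unfold pvTraj
    rw [hpeq]
  have hi999 : i < 999 := by omega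
  have hfi : pvFN^[i] n0 = pvFN^[999] n0 := by
    rw [pvTraj_getElem n0 i 1000 (by omega)] at hieq
    unfold pvTraj at hieq
    exact_mod_cast hieq
  have hfimin : ∀ t, t < i → pvFN^[t] n0 ≠ pvFN^[999] n0 := by
    intro t ht heq
    refine himin t (by omega) ?_
    rw [pvTraj_getElem n0 t 1000 (by omega)]
    unfold pvTraj
    exact_mod_cast congrArg (fun z : Nat => (z : Int)) heq
  have hdropget : ∀ (h : 999 - (i + 1) < (((List.range 1000).map (pvTraj n0)).drop (i + 1)).length),
      (((List.range 1000).map (pvTraj n0)).drop (i + 1))[999 - (i + 1)] = pvTraj n0 999 := by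
    intro h
    rw [List.getElem_drop]
    rw [pvTraj_getElem n0 _ 1000 (by omega)]
    congr 1
    omega
  have hdlen : (((List.range 1000).map (pvTraj n0)).drop (i + 1)).length = 1000 - (i + 1) := by
    simp
  have hmem2 : pvTraj n0 999 ∈ ((List.range 1000).map (pvTraj n0)).drop (i + 1) := by
    rw [← hdropget (by omega)]
    exact List.getElem_mem _
  obtain ⟨j', hj'⟩ := Option.isSome_iff_exists.mp
    ((PySem.List.index?_isSome_iff _ _).mpr hmem2)
  rw [hj']
  simp only [Option.getD_some]
  obtain ⟨hj'len, hj'eq, hj'min⟩ := PySem.List.getElem_of_index?_eq_some hj'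
  have hj'lt : j' < 1000 - (i + 1) := by omega
  have hcycEq : pvFN^[i + 1 + j'] n0 = pvFN^[999] n0 := by
    rw [List.getElem_drop] at hj'eq
    rw [pvTraj_getElem n0 _ 1000 (by omega)] at hj'eq
    unfold pvTraj at hj'eq
    exact_mod_cast hj'eq
  have hj'le : j' ≤ 999 - (i + 1) := by
    by_contra hgt
    refine hj'min (999 - (i + 1)) (by omega) ?_
    exact hdropget (by omega)
  have hcyc : pvFN^[i + (j' + 1)] n0 = pvFN^[i] n0 := by
    rw [show i + (j' + 1) = i + 1 + j' by omega, hcycEq]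
    exact hfi.symm
  have hcmin : ∀ q, 0 < q → q < j' + 1 → pvFN^[i + q] n0 ≠ pvFN^[i] n0 := by
    intro q hq0 hqc heq
    refine hj'min (q - 1) (by omega) ?_
    rw [List.getElem_drop]
    rw [pvTraj_getElem n0 _ 1000 (by omega)]
    unfold pvTraj
    have : pvFN^[i + 1 + (q - 1)] n0 = pvFN^[999] n0 := by
      rw [show i + 1 + (q - 1) = i + q by omega, heq, hfi]
    exact_mod_cast congrArg (fun z : Nat => (z : Int)) this
  have hc : (j' + (i + 1)) - i = j' + 1 := by omega
  rw [hc]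
  set c := j' + 1 with hcdef
  have hcpos : 0 < c := Nat.succ_pos _
  have hicle : i + c ≤ 999 := by omega
  have hmod : PySem.Int.mod (steps - (i : Int)) ((c : Int)) = (steps - (i : Int)) % (c : Int) :=
    PySem.Int.mod_eq_emod_of_pos (by exact_mod_cast hcpos)
  have hr0 : 0 ≤ (steps - (i : Int)) % (c : Int) :=
    Int.emod_nonneg _ (by exact_mod_cast Nat.pos_iff_ne_zero.mp hcpos)
  have hrc : (steps - (i : Int)) % (c : Int) < (c : Int) :=
    Int.emod_lt_of_pos _ (by exact_mod_cast hcpos)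
  refine ⟨i, c, ((steps - (i : Int)) % (c : Int)).toNat, hcpos, hicle, by omega, hfi, hfimin,
    hcyc, hcmin, ?_, ?_⟩
  · rw [hmod]; omega
  · rw [hmod]
    have hidx : (i : Int) + (steps - (i : Int)) % (c : Int)
        = ((i + ((steps - (i : Int)) % (c : Int)).toNat : Nat) : Int) := by
      push_cast; omega
    rw [hidx, PySem.List.pyGetD_natCast, pvTraj_getD n0 _ 1000 (by omega)]
    rfl

-- the cycles of the digit-square map: the fixed points 0 and 1 and the 8-cycle at 4
def pvCycList : List Nat := [0, 1, 4, 16, 37, 58, 89, 145, 42, 20]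

-- first step index (< 1000) at which the orbit of n0 enters a cycle (proof helper)
def pvTail? (n0 : Nat) : Option Nat :=
  (List.range 1000).find? (fun t => decide (pvFNC^[t] n0 ∈ pvCycList))

-- facts about the cycles of the digit-square map (checked by computation on pvFNC)
theorem pv_cyc_facts_c : ∀ w ∈ pvCycList, pvFNC w ∈ pvCycList ∧ pvFNC^[8] w = w := by decide

theorem pvFNC_fun_eq : pvFNC = pvFN := funext pvFNC_eq

theorem pv_cyc_closed : ∀ w ∈ pvCycList, pvFN w ∈ pvCycList := by
  intro w hw
  have := (pv_cyc_facts_c w hw).1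
  rwa [pvFNC_eq] at this

theorem pv_cyc_per8 : ∀ w ∈ pvCycList, pvFN^[8] w = w := by
  intro w hw
  have := (pv_cyc_facts_c w hw).2
  rwa [pvFNC_fun_eq] at this

-- every number ≤ 810 reaches a cycle within 1000 steps (checked by computation)
set_option maxHeartbeats 4000000 in
set_option maxRecDepth 20000 in
theorem pv_alltail : ∀ n, n ≤ 810 → (pvTail? n).isSome = true := by decide

theorem pvTail?_spec (n0 tl : Nat) (h : pvTail? n0 = some tl) :
    tl < 1000 ∧ pvFN^[tl] n0 ∈ pvCycList ∧ ∀ t, t < tl → pvFN^[t] n0 ∉ pvCycList := by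
  unfold pvTail? at h
  rw [List.find?_eq_some_iff_getElem] at h
  obtain ⟨hp, k, hk, hgk, hmin⟩ := h
  simp only [List.getElem_range] at hgk hmin
  subst hgk
  simp only [List.length_range] at hk
  refine ⟨hk, ?_, ?_⟩
  · have := of_decide_eq_true hp
    rwa [pvFNC_fun_eq] at this
  · intro t ht hmem
    have := hmin t ht
    rw [pvFNC_fun_eq] at this
    simp [hmem] at this

theorem pv_tail_facts (n0 t0 : Nat) (h0 : pvFN^[t0] n0 ∈ pvCycList) :
    ∃ tl, tl ≤ t0 ∧ pvFN^[tl] n0 ∈ pvCycList ∧ ∀ s, s < tl → pvFN^[s] n0 ∉ pvCycList := by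
  have hex : ∃ t, pvFN^[t] n0 ∈ pvCycList := ⟨t0, h0⟩
  exact ⟨Nat.find hex, Nat.find_min' hex h0, Nat.find_spec hex,
    fun s hs => Nat.find_min hex hs⟩

theorem pv_cyc_from (n0 tl : Nat) (h : pvFN^[tl] n0 ∈ pvCycList) :
    ∀ t, tl ≤ t → pvFN^[t] n0 ∈ pvCycList := by
  intro t ht
  obtain ⟨d, rfl⟩ := Nat.exists_eq_add_of_le ht
  clear ht
  induction d with
  | zero => simpa
  | succ d ihd =>
    rw [show tl + (d + 1) = (tl + d) + 1 by omega, Function.iterate_succ_apply']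
    exact pv_cyc_closed _ ihd

theorem pv_per8 (n0 tl : Nat) (h : pvFN^[tl] n0 ∈ pvCycList) :
    ∀ t, tl ≤ t → pvFN^[t + 8] n0 = pvFN^[t] n0 := by
  intro t ht
  rw [show t + 8 = 8 + t by omega, Function.iterate_add_apply]
  exact pv_cyc_per8 _ (pv_cyc_from n0 tl h t ht)

theorem pv_per8_mul (n0 tl : Nat) (h : pvFN^[tl] n0 ∈ pvCycList) :
    ∀ k t, tl ≤ t → pvFN^[t + 8 * k] n0 = pvFN^[t] n0 := by
  intro k
  induction k with
  | zero => intro t _; rfl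
  | succ k ihk =>
    intro t ht
    rw [show t + 8 * (k + 1) = (t + 8) + 8 * k by omega, ihk (t + 8) (by omega),
      pv_per8 n0 tl h t ht]

theorem pv_perc_ge (n0 i c : Nat) (hcy : pvFN^[i + c] n0 = pvFN^[i] n0) :
    ∀ t, i ≤ t → pvFN^[t + c] n0 = pvFN^[t] n0 := by
  intro t ht
  obtain ⟨u, rfl⟩ := Nat.exists_eq_add_of_le ht
  rw [show i + u + c = u + (i + c) by omega, Function.iterate_add_apply, hcy,
    show i + u = u + i by omega, Function.iterate_add_apply]

theorem pv_cdvd8 (n0 tl i c : Nat) (htl : pvFN^[tl] n0 ∈ pvCycList) (hti : tl ≤ i)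
    (hc : 0 < c) (hcy : pvFN^[i + c] n0 = pvFN^[i] n0)
    (hmin : ∀ p, 0 < p → p < c → pvFN^[i + p] n0 ≠ pvFN^[i] n0) : c ∣ 8 := by
  have h8 : pvFN^[i + 8] n0 = pvFN^[i] n0 := pv_per8 n0 tl htl i hti
  have hmp := pv_mod_period n0 i c hc hcy.symm (i + 8) (by omega)
  rw [show i + 8 - i = 8 by omega] at hmp
  by_cases hz : 8 % c = 0
  · exact Nat.dvd_of_mod_eq_zero hz
  · have hcontra : pvFN^[i + 8 % c] n0 = pvFN^[i] n0 := by
      rw [← hmp]; exact h8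
    exact absurd hcontra (hmin (8 % c) (by omega) (Nat.mod_lt _ hc))

theorem pv_perc_tail (n0 tl i c : Nat) (htl : pvFN^[tl] n0 ∈ pvCycList) (_hti : tl ≤ i)
    (hcy : pvFN^[i + c] n0 = pvFN^[i] n0) :
    ∀ t, tl ≤ t → pvFN^[t + c] n0 = pvFN^[t] n0 := by
  intro t ht
  have h1 : pvFN^[t + c + 8 * i] n0 = pvFN^[t + c] n0 := pv_per8_mul n0 tl htl i (t + c) (by omega)
  have h2 : pvFN^[(t + 8 * i) + c] n0 = pvFN^[t + 8 * i] n0 :=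
    pv_perc_ge n0 i c hcy (t + 8 * i) (by omega)
  have h3 : pvFN^[t + 8 * i] n0 = pvFN^[t] n0 := pv_per8_mul n0 tl htl i t ht
  rw [← h1, show t + c + 8 * i = (t + 8 * i) + c by omega, h2, h3]

theorem pv_perc_mul (n0 tl c : Nat) (hper : ∀ t, tl ≤ t → pvFN^[t + c] n0 = pvFN^[t] n0) :
    ∀ k t, tl ≤ t → pvFN^[t + c * k] n0 = pvFN^[t] n0 := by
  intro k
  induction k with
  | zero => intro t _; rfl
  | succ k ihk =>
    intro t ht
    rw [show t + c * (k + 1) = (t + c) + c * k by ring, ihk (t + c) (by omega), hper t ht]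

theorem pv_eq_of_congr (n0 tl c : Nat) (_hc : 0 < c)
    (hper : ∀ t, tl ≤ t → pvFN^[t + c] n0 = pvFN^[t] n0) :
    ∀ t t', tl ≤ t → tl ≤ t' → ((t : Int) % (c : Int) = (t' : Int) % (c : Int)) →
      pvFN^[t] n0 = pvFN^[t'] n0 := by
  have key : ∀ t t', tl ≤ t → tl ≤ t' → t ≤ t' →
      ((t : Int) % (c : Int) = (t' : Int) % (c : Int)) → pvFN^[t] n0 = pvFN^[t'] n0 := by
    intro t t' ht ht' hle hmod
    have hmn : t % c = t' % c := by exact_mod_cast hmod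
    have hdvd : c ∣ (t' - t) := (Nat.modEq_iff_dvd' hle).mp hmn
    obtain ⟨k, hk⟩ := hdvd
    have hw : t' = t + c * k := by
      generalize hck : c * k = w at hk; omega
    rw [hw]
    exact (pv_perc_mul n0 tl c hper k t ht).symm
  intro t t' ht ht' hmod
  rcases le_total t t' with h | h
  · exact key t t' ht ht' h hmod
  · exact (key t' t ht' ht h hmod.symm).symm

-- unfolding of B's body on a nonnegative N with its trajectory in model form
theorem pvB_unfold (N M : Int) (_hN : 0 ≤ N) (n0 : Nat) (hn0 : pvF N = ((n0 : Nat) : Int)) :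
    calculate_test_case_result_alt N M =
      if 0 ≤ M - 1 ∧ M - 1 < 1000 then
        PySem.List.pyGetD ((List.range 1000).map (pvTraj n0)) (M - 1) 0
      else pvCycleLookup ((List.range 1000).map (pvTraj n0)) (M - 1) := by
  unfold calculate_test_case_result_alt
  simp only [hn0, pvTrajectory_eq n0]
  have hlen : (((List.range 1000).map (pvTraj n0)).length : Int) = 1000 := by simp
  rw [hlen]

theorem pvF_of_nonneg (N : Int) (hN : 0 ≤ N) : pvF N = ((pvFN N.toNat : Nat) : Int) := by
  conv_lhs => rw [show N = ((N.toNat : Nat) : Int) by omega]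
  exact pvF_eq N.toNat

theorem pv_n0_le (N : Int) (hN : 0 ≤ N) (hDom : N ≤ 2147483648) : pvFN N.toNat ≤ 810 := by
  have h10 : N.toNat < 10 ^ 10 := by omega
  have := pvFN_le N.toNat 10 h10
  omega

-- main equivalence on the complement of D_
theorem pv_main (N M : Int) (hN : 0 ≤ N) (hDom : N ≤ 2147483648)
    (hnD : ¬ D_calculate_test_case_result N M) :
    calculate_test_case_result N M = calculate_test_case_result_alt N M := by
  obtain ⟨n0, hn0def⟩ : ∃ n0, pvFN N.toNat = n0 := ⟨_, rfl⟩
  have hn0le : n0 ≤ 810 := hn0def ▸ pv_n0_le N hN hDom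
  have h230 : ((2 : Int) ^ 30) = 1073741824 := by norm_num
  obtain ⟨K, hKdef⟩ : ∃ K, ((M - 1) % (1073741824 : Int)).toNat = K := ⟨_, rfl⟩
  have hKlt : K < 1073741824 := by omega
  have hKcast : ((K : Nat) : Int) = (M - 1) % (1073741824 : Int) := by omega
  rw [pvA_eq N M hN hDom, pvB_unfold N M hN n0 (by rw [pvF_of_nonneg N hN, hn0def])]
  rw [h230, hKdef, hn0def]
  by_cases hin : 0 ≤ M - 1 ∧ M - 1 < 1000
  · rw [if_pos hin]
    have hKeq : ((K : Nat) : Int) = M - 1 := by omega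
    conv_rhs => rw [← hKeq]
    rw [PySem.List.pyGetD_natCast, pvTraj_getD n0 K 1000 (by omega)]
    rfl
  · rw [if_neg hin]
    obtain ⟨i, c, r, hc, hic, hrc, hfi, hfimin, hcyc, hcmin, hreq, hlook⟩ :=
      pvCycleLookup_char n0 (by omega) (M - 1)
    rw [hlook]
    by_cases hbig : M < 1 ∨ (1073741825 : Int) ≤ M
    · -- the truncated-step-count region: use ¬D_ (the step count clears the tail)
      have hcyc999 : pvFN^[min K 999] n0 ∈ pvCycList := by
        by_contra hne
        refine hnD ⟨hbig, ?_⟩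
        show pvFNC^[min (((M - 1) % 1073741824).toNat) 999] (pvFNC N.toNat) ∉ pvCycList
        rw [pvFNC_fun_eq, hn0def, hKdef]
        exact hne
      obtain ⟨tl, htlt0, htlcyc, htlmin⟩ := pv_tail_facts n0 (min K 999) hcyc999
      have hKtl : tl ≤ K := by omega
      have hitl : tl ≤ i := by
        by_contra hlt
        have h999 : pvFN^[999] n0 ∈ pvCycList := pv_cyc_from n0 tl htlcyc 999 (by omega)
        have hiC : pvFN^[i] n0 ∈ pvCycList := by rw [hfi]; exact h999
        exact htlmin i (by omega) hiC
      have hc8 : c ∣ 8 := pv_cdvd8 n0 tl i c htlcyc hitl hc hcyc hcmin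
      have hc230 : (c : Int) ∣ (1073741824 : Int) := by
        have h8 : (c : Int) ∣ (8 : Int) := by exact_mod_cast hc8
        exact h8.trans (by norm_num)
      have hcong : ((K : Nat) : Int) % (c : Int) = ((i + r : Nat) : Int) % (c : Int) := by
        rw [hKcast, Int.emod_emod_of_dvd _ hc230]
        have hir : ((i + r : Nat) : Int) = (i : Int) + ((M - 1) - (i : Int)) % (c : Int) := by
          push_cast
          rw [hreq, PySem.Int.mod_eq_emod_of_pos (by exact_mod_cast hc)]
        rw [hir, Int.add_emod, Int.emod_emod_of_dvd _ (dvd_refl _), ← Int.add_emod]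
        ring_nf
      have hper := pv_perc_tail n0 tl i c htlcyc hitl hcyc
      rw [pv_eq_of_congr n0 tl c hc hper K (i + r) hKtl (by omega) hcong]
    · -- 1000 ≤ M - 1 < 2^30: the truncation is the identity
      have hsteps : 1000 ≤ M - 1 ∧ M - 1 < 1073741824 := by omega
      have hKeq : ((K : Nat) : Int) = M - 1 := by omega
      have hK1000 : 1000 ≤ K := by omega
      rw [pv_mod_period n0 i c hc hcyc.symm K (by omega)]
      congr 2
      have hcast : ((r : Nat) : Int) = (((K - i) % c : Nat) : Int) := by
        rw [hreq, PySem.Int.mod_eq_emod_of_pos (by exact_mod_cast hc), ← hKeq]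
        rw [show ((K : Nat) : Int) - (i : Int) = ((K - i : Nat) : Int) by omega]
        exact_mod_cast (Int.natCast_mod (K - i) c)
      have hr : r = (K - i) % c := by exact_mod_cast hcast
      omega

-- ===== VERDICT (by name: the statements are the Claim_ definitions above) =====
theorem calculate_test_case_result_spec : Claim_unchanged_calculate_test_case_result := by
  intro N M hDom hPre
  unfold Spec_calculate_test_case_result
  intro hnD
  have hD : N ≤ 2147483648 := by
    unfold Dom_calculate_test_case_result pvDomInt at hDom
    simp only [Bool.and_eq_true, decide_eq_true_eq] at hDom
    exact hDom.1.2
  exact pv_main N M hPre hD hnD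

set_option maxRecDepth 20000 in
set_option maxHeartbeats 4000000 in
theorem calculate_test_case_result_changed : Claim_changed_calculate_test_case_result := by
  unfold Claim_changed_calculate_test_case_result
  refine ⟨by decide, by decide, by decide, ?_, ?_, by decide⟩
  · show calculate_test_case_result 5 1073741825 = 25
    rw [pvA_eq 5 1073741825 (by norm_num) (by norm_num)]
    norm_num
    rw [show ((5 : Int)).toNat = 5 by rfl]
    rw [show pvFN 5 = 25 by rw [← pvFNC_eq]; decide]
    norm_num
  · show calculate_test_case_result_alt 5 1073741825 = 16
    decide

theorem calculate_test_case_result_tight : Claim_exact_calculate_test_case_result := by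
  intro N M hDom hPre hDiff
  have hD : N ≤ 2147483648 := by
    unfold Dom_calculate_test_case_result pvDomInt at hDom
    simp only [Bool.and_eq_true, decide_eq_true_eq] at hDom
    exact hDom.1.2
  obtain ⟨hbig, hall⟩ := hDiff
  obtain ⟨n0, hn0def⟩ : ∃ n0, pvFN N.toNat = n0 := ⟨_, rfl⟩
  have hn0le : n0 ≤ 810 := hn0def ▸ pv_n0_le N hPre hD
  have h230 : ((2 : Int) ^ 30) = 1073741824 := by norm_num
  obtain ⟨K, hKdef⟩ : ∃ K, ((M - 1) % (1073741824 : Int)).toNat = K := ⟨_, rfl⟩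
  -- the orbit reaches a cycle within 999 steps, with a minimal tail index tl
  obtain ⟨tl0, htl0⟩ : ∃ tl0, pvTail? n0 = some tl0 :=
    Option.isSome_iff_exists.mp (pv_alltail n0 hn0le)
  obtain ⟨htl0_1000, htl0cyc, _⟩ := pvTail?_spec n0 tl0 htl0
  obtain ⟨tl, htltl0, htlcyc, htlmin⟩ := pv_tail_facts n0 tl0 htl0cyc
  -- restate D_'s second conjunct over pvFN
  have hall' : pvFN^[min K 999] n0 ∉ pvCycList := by
    have h : pvFNC^[min (((M - 1) % 1073741824).toNat) 999] (pvFNC N.toNat) ∉ pvCycList := hall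
    rw [pvFNC_fun_eq, hn0def, hKdef] at h
    exact h
  -- the truncated step count falls short of the tail
  have hKtl : K < tl := by
    by_contra hge
    exact hall' (pv_cyc_from n0 tl htlcyc (min K 999) (by omega))
  -- A's value is a pre-cycle iterate, B's is a cycle value
  rw [pvA_eq N M hPre hD, pvB_unfold N M hPre n0 (by rw [pvF_of_nonneg N hPre, hn0def])]
  rw [h230, hKdef, hn0def]
  have hnotin : ¬ (0 ≤ M - 1 ∧ M - 1 < 1000) := by
    rcases hbig with h | h
    · exact fun hx => absurd hx.1 (by omega)
    · exact fun hx => absurd hx.2 (by omega)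
  rw [if_neg hnotin]
  obtain ⟨i, c, r, hc, hic, hrc, hfi, hfimin, hcyc, hcmin, hreq, hlook⟩ :=
    pvCycleLookup_char n0 (by omega) (M - 1)
  rw [hlook]
  have hitl : tl ≤ i := by
    by_contra hlt
    have h999 : pvFN^[999] n0 ∈ pvCycList := pv_cyc_from n0 tl htlcyc 999 (by omega)
    have hiC : pvFN^[i] n0 ∈ pvCycList := by rw [hfi]; exact h999
    exact htlmin i (by omega) hiC
  have hBcyc : pvFN^[i + r] n0 ∈ pvCycList := pv_cyc_from n0 tl htlcyc (i + r) (by omega)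
  have hAnot : pvFN^[K] n0 ∉ pvCycList := htlmin K hKtl
  intro hEq
  have hNatEq : pvFN^[K] n0 = pvFN^[i + r] n0 := by exact_mod_cast hEq
  refine hAnot ?_
  rw [hNatEq]
  exact hBcyc
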